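-- pv_equiv track=rewrite | github.com/Ninecl/SalT | data/data_analyse.py | triplets2id
-- ===== SOURCE A (Python) =====
-- def triplets2id(triplets):
--     ent2id, rel2id = dict(), dict()
--     ent_cnt, rel_cnt = 0, 0
--     for h, r, t in triplets:
--         if h not in ent2id:
--             ent2id[h] = ent_cnt
--             ent_cnt += 1
--         if t not in ent2id:
--             ent2id[t] = ent_cnt
--             ent_cnt += 1
--         if r not in rel2id:
--             rel2id[r] = rel_cnt
--             rel_cnt += 1
--     return ent2id, rel2id
-- ===== SOURCE B (Python) =====
-- def triplets2id(triplets):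
--     triplets = list(triplets)
--     ents = [x for h, r, t in triplets for x in (h, t)]
--     rels = [r for h, r, t in triplets]
--
--     def number(stream):
--         # distinct keys, ordered by sorting on the position of each key's
--         # first occurrence (key is injective on the set, so order is exact)
--         keys = sorted(set(stream), key=stream.index)
--         return {k: i for i, k in enumerate(keys)}
--
--     return number(ents), number(rels)
-- ===== Notes on version B (the rewrite author's own statement) =====
-- stated objective: alternative
-- what changed: Instead of numbering keys with inline counters in one pass, B collects the distinct keys as a set and SORTS them by the position of their first occurrence (sorted(set(stream), key=stream.index)), then numbers the sorted keys with enumerate; correctness follows because first-occurrence positions are unique per key and increase along first-seen order.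
import Mathlib
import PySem

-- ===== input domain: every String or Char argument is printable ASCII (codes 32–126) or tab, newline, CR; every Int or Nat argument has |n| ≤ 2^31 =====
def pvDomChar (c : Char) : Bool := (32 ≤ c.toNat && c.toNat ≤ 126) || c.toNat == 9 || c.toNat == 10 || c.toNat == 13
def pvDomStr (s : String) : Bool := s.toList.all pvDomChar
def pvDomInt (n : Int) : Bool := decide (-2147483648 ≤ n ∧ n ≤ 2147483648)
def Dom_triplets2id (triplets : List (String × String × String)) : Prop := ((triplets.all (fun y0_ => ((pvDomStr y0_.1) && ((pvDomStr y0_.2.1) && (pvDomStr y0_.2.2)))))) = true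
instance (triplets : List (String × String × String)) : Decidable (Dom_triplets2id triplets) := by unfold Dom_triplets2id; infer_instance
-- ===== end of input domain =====

-- B replaces A's single-pass inline counters with: collect distinct keys as a set, SORT them by first-occurrence position, then number with enumerate.


-- ===== PORT A =====
-- loop body of A: update (ent2id, ent_cnt, rel2id, rel_cnt) for one triplet (h, r, t)
def pvStepA (s : PySem.Dict String Int × Int × PySem.Dict String Int × Int)
    (tr : String × String × String) : PySem.Dict String Int × Int × PySem.Dict String Int × Int :=
  let p1 := if s.1.contains tr.1 then (s.1, s.2.1) else (s.1.insert tr.1 s.2.1, s.2.1 + 1)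
  let p2 := if p1.1.contains tr.2.2 then p1 else (p1.1.insert tr.2.2 p1.2, p1.2 + 1)
  let p3 := if s.2.2.1.contains tr.2.1 then (s.2.2.1, s.2.2.2) else (s.2.2.1.insert tr.2.1 s.2.2.2, s.2.2.2 + 1)
  (p2.1, p2.2, p3.1, p3.2)

def triplets2id (triplets : List (String × String × String)) : (List (String × Int)) × (List (String × Int)) :=
  let st := triplets.foldl pvStepA (PySem.Dict.empty, 0, PySem.Dict.empty, 0)
  (st.1.items, st.2.2.1.items)

-- ===== PORT B =====
-- number(stream): keys = sorted(set(stream), key=stream.index); {k: i for i, k in enumerate(keys)}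
-- stream.index never raises here (every key of the set occurs in stream), so '(index? …).getD 0' is exact;
-- the key is injective on the set (first-occurrence positions are distinct), so the sort order is exact.
def pvNumber (stream : List String) : List (String × Int) :=
  let keys := PySem.List.sorted (PySem.Set.ofList stream)
      (fun k => (PySem.List.index? stream k).getD 0)
  (PySem.List.enumerate keys 0).map (fun p => (p.2, p.1))

def triplets2id_alt (triplets : List (String × String × String)) : (List (String × Int)) × (List (String × Int)) :=
  let ents := triplets.flatMap (fun tr => [tr.1, tr.2.2])
  let rels := triplets.map (fun tr => tr.2.1)
  (pvNumber ents, pvNumber rels)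

-- ===== PRECONDITION & SPEC =====
def Spec_triplets2id (triplets : List (String × String × String)) (out : (List (String × Int)) × (List (String × Int))) : Prop := out = triplets2id_alt triplets
instance (triplets : List (String × String × String)) (out : (List (String × Int)) × (List (String × Int))) : Decidable (Spec_triplets2id triplets out) := by unfold Spec_triplets2id; infer_instance

-- ===== CLAIM (what is proved, stated in full; the proofs are below) =====
def Claim_equal_triplets2id : Prop := ∀ (triplets : List (String × String × String)), Dom_triplets2id triplets → Spec_triplets2id triplets (triplets2id triplets)

-- ===== LEMMAS AND PROOFS =====

-- {k: i for i, k in enumerate(ks)} as an association list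
def pvIdx (keys : List String) : List (String × Int) :=
  (PySem.List.enumerate keys 0).map (fun p => (p.2, p.1))

lemma anyKey_enum (ks : List String) (x : String) : ∀ s : Int,
    ((PySem.List.enumerate ks s).map (fun p => (p.2, p.1))).any (fun p => p.1 == x) = ks.contains x := by
  induction ks with
  | nil => intro s; rfl
  | cons k ks ih =>
    intro s
    simp only [PySem.List.enumerate_cons, List.map_cons, List.any_cons, ih (s + 1),
      List.contains_cons]
    rw [BEq.comm]

lemma contains_mkIdx (ks : List String) (x : String) :
    (PySem.Dict.mk (pvIdx ks)).contains x = ks.contains x := by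
  simpa only [PySem.Dict.contains, pvIdx] using anyKey_enum ks x 0

lemma pvIdx_append (ks : List String) (x : String) :
    pvIdx (ks ++ [x]) = pvIdx ks ++ [(x, (ks.length : Int))] := by
  simp [pvIdx, PySem.List.enumerate_append, PySem.List.enumerate]

lemma insert_mkIdx (ks : List String) (x : String) (h : ks.contains x = false) :
    (PySem.Dict.mk (pvIdx ks)).insert x (ks.length : Int) = PySem.Dict.mk (pvIdx (ks ++ [x])) := by
  have hc : (PySem.Dict.mk (pvIdx ks)).contains x = false := by rw [contains_mkIdx]; exact h
  simp only [PySem.Dict.insert, hc, Bool.false_eq_true, if_false, pvIdx_append]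

lemma add1_mkIdx (ks : List String) (x : String) :
    (if (PySem.Dict.mk (pvIdx ks)).contains x then (PySem.Dict.mk (pvIdx ks), (ks.length : Int))
     else ((PySem.Dict.mk (pvIdx ks)).insert x (ks.length : Int), (ks.length : Int) + 1))
    = (PySem.Dict.mk (pvIdx (PySem.Set.add ks x)), ((PySem.Set.add ks x).length : Int)) := by
  rw [contains_mkIdx]
  have hsc : PySem.Set.contains ks x = ks.contains x := rfl
  unfold PySem.Set.add
  rw [hsc]
  by_cases hx : ks.contains x
  · rw [if_pos hx, if_pos hx]
  · rw [if_neg hx, if_neg hx, insert_mkIdx ks x (by simpa using hx)]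
    simp only [List.length_append, List.length_cons, List.length_nil]
    push_cast
    rfl

lemma stepA_eq (ek rk : List String) (tr : String × String × String) :
    pvStepA (PySem.Dict.mk (pvIdx ek), (ek.length : Int), PySem.Dict.mk (pvIdx rk), (rk.length : Int)) tr
    = (PySem.Dict.mk (pvIdx (PySem.Set.add (PySem.Set.add ek tr.1) tr.2.2)),
       ((PySem.Set.add (PySem.Set.add ek tr.1) tr.2.2).length : Int),
       PySem.Dict.mk (pvIdx (PySem.Set.add rk tr.2.1)),
       ((PySem.Set.add rk tr.2.1).length : Int)) := by
  obtain ⟨h, r, t⟩ := tr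
  simp only [pvStepA]
  rw [add1_mkIdx ek h, add1_mkIdx rk r]
  dsimp only
  rw [add1_mkIdx (PySem.Set.add ek h) t]

lemma loop_eq (ts : List (String × String × String)) : ∀ ek rk : List String,
    ts.foldl pvStepA (PySem.Dict.mk (pvIdx ek), (ek.length : Int), PySem.Dict.mk (pvIdx rk), (rk.length : Int))
    = (PySem.Dict.mk (pvIdx (ts.foldl (fun s tr => PySem.Set.add (PySem.Set.add s tr.1) tr.2.2) ek)),
       ((ts.foldl (fun s tr => PySem.Set.add (PySem.Set.add s tr.1) tr.2.2) ek).length : Int),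
       PySem.Dict.mk (pvIdx (ts.foldl (fun s tr => PySem.Set.add s tr.2.1) rk)),
       ((ts.foldl (fun s tr => PySem.Set.add s tr.2.1) rk).length : Int)) := by
  induction ts with
  | nil => intro ek rk; rfl
  | cons tr ts ih =>
    intro ek rk
    simp only [List.foldl_cons, stepA_eq]
    exact ih _ _

-- first-occurrence positions strictly increase along the first-seen order of set(xs)
lemma pairwise_firstIdx (xs : List String) :
    (PySem.Set.ofList xs).Pairwise
      (fun a b => (PySem.List.index? xs a).getD 0 < (PySem.List.index? xs b).getD 0) := by
  induction xs using List.reverseRecOn with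
  | nil => simp [PySem.Set.ofList]
  | append_singleton xs x ih =>
    have hofl : PySem.Set.ofList (xs ++ [x]) = PySem.Set.add (PySem.Set.ofList xs) x := by
      simp [PySem.Set.ofList_eq_foldl, List.foldl_append]
    have hmem : ∀ a, a ∈ PySem.Set.ofList xs → a ∈ xs :=
      fun a ha => (PySem.Set.mem_ofList xs a).1 ha
    have hidx : ∀ a, a ∈ xs → PySem.List.index? (xs ++ [x]) a = PySem.List.index? xs a :=
      fun a ha => PySem.List.index?_append_of_mem [x] ha
    have hpw : (PySem.Set.ofList xs).Pairwise
        (fun a b => (PySem.List.index? (xs ++ [x]) a).getD 0 < (PySem.List.index? (xs ++ [x]) b).getD 0) := by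
      refine List.Pairwise.imp_of_mem ?_ ih
      intro a b ha hb hl
      rw [hidx a (hmem a ha), hidx b (hmem b hb)]; exact hl
    rw [hofl]
    unfold PySem.Set.add
    by_cases hx : PySem.Set.contains (PySem.Set.ofList xs) x
    · rw [if_pos hx]; exact hpw
    · rw [if_neg hx]
      have hxn : x ∉ xs := by
        intro hxm
        apply hx
        have h1 : x ∈ PySem.Set.ofList xs := (PySem.Set.mem_ofList xs x).2 hxm
        simpa [PySem.Set.contains] using h1
      refine List.pairwise_append.2 ⟨hpw, List.pairwise_singleton _ _, ?_⟩
      intro a ha b hb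
      have hbx : b = x := List.mem_singleton.1 hb
      subst hbx
      have hax : a ∈ xs := hmem a ha
      have hsome : (PySem.List.index? xs a).isSome = true :=
        (PySem.List.index?_isSome_iff xs a).2 hax
      obtain ⟨k, hk⟩ := Option.isSome_iff_exists.1 hsome
      obtain ⟨hklt, -, -⟩ := PySem.List.getElem_of_index?_eq_some hk
      rw [hidx a hax, hk, PySem.List.index?_append_singleton_self _ _ hxn]
      simpa using hklt

-- sorted(set(stream), key=stream.index) is exactly set(stream) (first-seen order)
lemma sorted_ofList_firstIdx (stream : List String) :
    PySem.List.sorted (PySem.Set.ofList stream)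
      (fun k => (PySem.List.index? stream k).getD 0) = PySem.Set.ofList stream :=
  PySem.List.sorted_eq_of_perm_of_pairwise_lt _ _ _ (List.Perm.refl _) (pairwise_firstIdx stream)

lemma pvNumber_eq (stream : List String) : pvNumber stream = pvIdx (PySem.Set.ofList stream) := by
  unfold pvNumber pvIdx
  rw [sorted_ofList_firstIdx]

-- ===== VERDICT (by name: the statement is the Claim_ definition above) =====
theorem triplets2id_spec : Claim_equal_triplets2id := by
  intro ts _
  show _ = _
  unfold triplets2id triplets2id_alt
  have h0 : (PySem.Dict.empty (κ := String) (ν := Int), (0 : Int), PySem.Dict.empty (κ := String) (ν := Int), (0 : Int))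
      = (PySem.Dict.mk (pvIdx []), (([] : List String).length : Int), PySem.Dict.mk (pvIdx []), (([] : List String).length : Int)) := rfl
  rw [h0, loop_eq]
  simp only [pvNumber_eq, PySem.Set.ofList_eq_foldl, List.foldl_flatMap, List.foldl_map]
  rfl
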